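-- pv_equiv track=rewrite | github.com/yasintuncer/hamming_code_simulator | src/view/hamming_code_ui.py | create_tags
-- ===== SOURCE A (Python) =====
-- def find_parity_indices(data_length):
--     parity_indices = []
--     r = 0
--     while 2**r < data_length + r + 1:
--         parity_indices.append(2**r - 1)
--         r += 1
--     return parity_indices
--
-- def create_tags(data_length):
--     parity_indices = find_parity_indices(data_length)
--     parity_count = len(parity_indices)
--     table_data = [None] * (data_length + parity_count)
--
--     # Insert parity bits
--     for parity_index in parity_indices:
--         table_data[parity_index] = "P"+ str(parity_index)
--
--     # Insert data bits
--     data_index = 0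
--     for i in range(len(table_data)):
--         if table_data[i] is None:
--             table_data[i] = "D" + str(data_index)
--             data_index += 1
--
--     return table_data
-- ===== SOURCE B (Python) =====
-- def create_tags(data_length):
--     tags = []
--     i = 0
--     data_index = 0
--     next_parity = 1
--     while data_index < data_length:
--         if i + 1 == next_parity:
--             tags.append("P" + str(i))
--             next_parity *= 2
--         else:
--             tags.append("D" + str(data_index))
--             data_index += 1
--         i += 1
--     return tags
-- ===== Notes on version B (the rewrite author's own statement) =====
-- stated objective: simpler
-- what changed: Replaced the three-phase construction (precompute parity indices with a helper, pre-fill a None table, then a second scan assigning data labels) by one fused forward loop that decides parity-vs-data per position while tracking the next parity position, stopping when all data bits are placed.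
import Mathlib
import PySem

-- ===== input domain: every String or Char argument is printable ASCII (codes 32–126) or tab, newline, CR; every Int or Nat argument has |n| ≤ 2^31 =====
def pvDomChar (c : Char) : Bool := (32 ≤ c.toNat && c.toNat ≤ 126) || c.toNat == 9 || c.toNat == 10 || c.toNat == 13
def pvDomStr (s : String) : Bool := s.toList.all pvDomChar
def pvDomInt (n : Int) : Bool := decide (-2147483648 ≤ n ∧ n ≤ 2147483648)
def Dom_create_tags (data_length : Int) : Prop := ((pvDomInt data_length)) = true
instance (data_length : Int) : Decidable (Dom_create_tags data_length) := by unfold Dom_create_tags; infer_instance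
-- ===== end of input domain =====

-- B replaces A's three phases (helper computing parity indices, None-filled table, second scan
-- assigning data labels) by one fused forward loop deciding parity/data per position; objective: simpler.

-- ===== PORT A =====

-- termination helper for A's while loop (cited in decreasing_by)
theorem pv_two_mul_le_two_pow (r : ℕ) : 2 * r ≤ 2 ^ r := by
  induction r with
  | zero => simp
  | succ k ih =>
    have h := Nat.lt_two_pow_self (n := k)
    have : 2 ^ (k + 1) = 2 * 2 ^ k := by ring
    omega

-- while 2**r < data_length + r + 1: parity_indices.append(2**r - 1); r += 1
def find_parity_indices_loop (data_length : Int) (parity_indices : List Int) (r : Nat) : List Int :=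
  if (2:Int)^r < data_length + r + 1 then
    find_parity_indices_loop data_length (parity_indices ++ [(2:Int)^r - 1]) (r+1)
  else parity_indices
termination_by (data_length + 1 - r).toNat
decreasing_by
  rename_i h
  have h2 : (2 * r : Int) ≤ (2:Int)^r := by exact_mod_cast pv_two_mul_le_two_pow r
  omega

def find_parity_indices (data_length : Int) : List Int :=
  find_parity_indices_loop data_length [] 0

-- for parity_index in parity_indices: table_data[parity_index] = "P" + str(parity_index)
-- (.toNat is exact: the indices are nonnegative and always in range, as the equivalence proof shows)
def insert_parity (table : List (Option String)) (l : List Int) : List (Option String) :=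
  l.foldl (fun t idx => t.set idx.toNat (some ("P" ++ PySem.Int.toStr idx))) table

-- for i in range(len(table_data)): if table_data[i] is None: assign "D"+str(data_index); data_index += 1
def data_fill (table : List (Option String)) (data_index : Int) (i : Nat) : List (Option String) :=
  if h : i < table.length then
    match table[i] with
    | none => data_fill (table.set i (some ("D" ++ PySem.Int.toStr data_index))) (data_index + 1) (i+1)
    | some _ => data_fill table data_index (i+1)
  else table
termination_by table.length - i
decreasing_by
  · simp only [List.length_set]; omega
  · omega

def create_tags (data_length : Int) : List String :=
  let parity_indices := find_parity_indices data_length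
  let parity_count : Int := parity_indices.length
  -- [None] * (data_length + parity_count): empty when the count is ≤ 0, as in Python
  let table0 : List (Option String) := List.replicate (data_length + parity_count).toNat none
  let table1 := insert_parity table0 parity_indices
  let table2 := data_fill table1 0 0
  -- by the end of the second loop every entry is a string (None never survives)
  table2.map (fun o => o.getD "")

-- ===== PORT B =====

-- while data_index < data_length: parity position (i+1 == next_parity) or data position
def create_tags_loop (data_length : Int) (tags : List String) (i data_index next_parity : Int) : List String :=
  if data_index < data_length then
    if i + 1 = next_parity then
      create_tags_loop data_length (tags ++ ["P" ++ PySem.Int.toStr i]) (i+1) data_index (next_parity * 2)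
    else
      create_tags_loop data_length (tags ++ ["D" ++ PySem.Int.toStr data_index]) (i+1) (data_index+1) next_parity
  else tags
termination_by (3*(data_length - data_index) + (if i + 1 = next_parity then (if next_parity = 1 then 2 else 1) else 0)).toNat
decreasing_by
  · rename_i hlt heq
    split_ifs <;> omega
  · rename_i hlt hne
    split_ifs <;> omega

def create_tags_alt (data_length : Int) : List String :=
  create_tags_loop data_length [] 0 0 1

-- ===== PRECONDITION & SPEC =====
def Spec_create_tags (data_length : Int) (out : List String) : Prop := out = create_tags_alt data_length
instance (data_length : Int) (out : List String) : Decidable (Spec_create_tags data_length out) := by unfold Spec_create_tags; infer_instance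

-- ===== CLAIM (what is proved, stated in full; the proofs are below) =====
def Claim_equal_create_tags : Prop := ∀ (data_length : Int), Dom_create_tags data_length → Spec_create_tags data_length (create_tags data_length)

-- ===== LEMMAS AND PROOFS =====

-- R m: the number of parity bits for m data bits (least r with m + r + 1 ≤ 2^r)
theorem pvR_ex (m : ℕ) : ∃ r, m + r + 1 ≤ 2 ^ r := by
  refine ⟨m + 2, ?_⟩
  have h1 := pv_two_mul_le_two_pow (m + 2)
  omega

def pvR (m : ℕ) : ℕ := Nat.find (pvR_ex m)

theorem pvR_spec (m : ℕ) : m + pvR m + 1 ≤ 2 ^ (pvR m) := Nat.find_spec (pvR_ex m)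

theorem pvR_min (m : ℕ) {k : ℕ} (hk : k < pvR m) : 2 ^ k < m + k + 1 := by
  have := Nat.find_min (pvR_ex m) hk
  omega

theorem pv_pow_gap (a b : ℕ) (h : a ≤ b) : 2 ^ a + (b - a) ≤ 2 ^ b := by
  induction b with
  | zero => interval_cases a; simp
  | succ k ih =>
    rcases Nat.lt_or_ge a (k+1) with h1 | h1
    · have h2 := ih (by omega)
      have h3 : 2 ^ (k+1) = 2 * 2 ^ k := by ring
      have h4 : 1 ≤ 2 ^ k := Nat.one_le_two_pow
      omega
    · have : a = k + 1 := by omega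
      simp [this]

-- B's loop with accumulator: the accumulator only prefixes the result
theorem pv_loop_acc (d : Int) : ∀ (fuel : ℕ) (i di p : Int) (tags : List String),
    (3*(d - di) + (if i + 1 = p then (if p = 1 then 2 else 1) else 0)).toNat ≤ fuel →
    create_tags_loop d tags i di p = tags ++ create_tags_loop d [] i di p := by
  intro fuel
  induction fuel with
  | zero =>
    intro i di p tags h
    have hnd : ¬ di < d := by split_ifs at h <;> omega
    rw [create_tags_loop]
    conv_rhs => rw [create_tags_loop]
    simp [hnd]
  | succ k ih =>
    intro i di p tags h
    rw [create_tags_loop]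
    conv_rhs => rw [create_tags_loop]
    by_cases hd : di < d
    · simp only [if_pos hd]
      by_cases hp : i + 1 = p
      · simp only [if_pos hp]
        have hm : (3*(d - di) + (if i + 1 + 1 = p * 2 then (if p * 2 = 1 then 2 else 1) else 0)).toNat ≤ k := by
          split_ifs at h ⊢ <;> omega
        rw [ih (i+1) di (p*2) (tags ++ ["P" ++ PySem.Int.toStr i]) hm,
            ih (i+1) di (p*2) ([] ++ ["P" ++ PySem.Int.toStr i]) hm]
        simp
      · simp only [if_neg hp]
        have hm : (3*(d - (di+1)) + (if i + 1 + 1 = p then (if p = 1 then 2 else 1) else 0)).toNat ≤ k := by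
          split_ifs at h ⊢ <;> omega
        rw [ih (i+1) (di+1) p (tags ++ ["D" ++ PySem.Int.toStr di]) hm,
            ih (i+1) (di+1) p ([] ++ ["D" ++ PySem.Int.toStr di]) hm]
        simp
    · simp [hd]

-- A's helper loop produces [2^r - 1 for r in range(pvR m)]
theorem pv_fpi_loop (m : ℕ) : ∀ (fuel r : ℕ) (acc : List Int), pvR m - r = fuel → r ≤ pvR m →
    find_parity_indices_loop (m:Int) acc r = acc ++ (List.range' r (pvR m - r)).map (fun k => (2:Int)^k - 1) := by
  intro fuel
  induction fuel with
  | zero =>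
    intro r acc hf hr
    have hrR : r = pvR m := by omega
    rw [find_parity_indices_loop]
    have hspec := pvR_spec m
    have hle : m + r + 1 ≤ 2 ^ r := by rw [hrR]; exact hspec
    have hcond : ¬ ((2:Int)^r < (m:Int) + r + 1) := by
      exact_mod_cast not_lt.mpr (by exact_mod_cast hle)
    simp [hcond, hf]
  | succ k ih =>
    intro r acc hf hr
    have hrR : r < pvR m := by omega
    have hlt := pvR_min m hrR
    rw [find_parity_indices_loop]
    have hcond : ((2:Int)^r < (m:Int) + r + 1) := by exact_mod_cast hlt
    rw [if_pos hcond]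
    rw [ih (r+1) (acc ++ [(2:Int)^r - 1]) (by omega) (by omega)]
    have hsplit : pvR m - r = (pvR m - (r+1)) + 1 := by omega
    rw [hsplit, List.range'_succ]
    simp

theorem pv_fpi (m : ℕ) : find_parity_indices (m:Int) = (List.range (pvR m)).map (fun k => (2:Int)^k - 1) := by
  unfold find_parity_indices
  rw [pv_fpi_loop m (pvR m) 0 [] (by omega) (by omega)]
  simp [List.range_eq_range']

-- the parity-filled table, built index by index
def pvPT (m : ℕ) : ℕ → List (Option String)
  | 0 => List.replicate (m + pvR m) none
  | (r+1) => (pvPT m r).set (2^r - 1) (some ("P" ++ PySem.Int.toStr ((2:Int)^r - 1)))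

theorem pvPT_length (m r : ℕ) : (pvPT m r).length = m + pvR m := by
  induction r with
  | zero => simp [pvPT]
  | succ k ih => simp [pvPT, List.length_set, ih]

theorem pv_pow_cast (k : ℕ) : ((2:Int)^k - 1) = ((2^k - 1 : ℕ) : Int) := by
  have h4 : (1:ℕ) ≤ 2^k := Nat.one_le_two_pow
  have hX : ((2:Int)^k) = ((2^k : ℕ) : Int) := by push_cast; ring
  omega

theorem pv_insert_parity_eq (m : ℕ) (r : ℕ) (hr : r ≤ pvR m) :
    insert_parity (List.replicate (m + pvR m) none) ((List.range r).map (fun k => (2:Int)^k - 1)) = pvPT m r := by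
  induction r with
  | zero => simp [insert_parity, pvPT]
  | succ k ih =>
    rw [List.range_succ]
    simp only [List.map_append, List.map_cons, List.map_nil]
    unfold insert_parity at ih ⊢
    rw [List.foldl_append, ih (by omega)]
    simp only [List.foldl_cons, List.foldl_nil, pvPT]
    have ht : ((2:Int)^k - 1).toNat = 2^k - 1 := by rw [pv_pow_cast]; omega
    rw [ht]

theorem pvPT_get (m : ℕ) (r : ℕ) (hr : r ≤ pvR m) (j : ℕ) (hj : j < m + pvR m) :
    (pvPT m r)[j]'(by rw [pvPT_length]; exact hj) =
      if ∃ k, k < r ∧ j = 2^k - 1 then some ("P" ++ PySem.Int.toStr (j:Int)) else none := by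
  induction r with
  | zero =>
    simp [pvPT, List.getElem_replicate]
  | succ t ih =>
    have htR : t < pvR m := by omega
    have hlen : 2^t - 1 < (pvPT m t).length := by
      rw [pvPT_length]
      have := pvR_min m htR
      have h4 : (1:ℕ) ≤ 2^t := Nat.one_le_two_pow
      omega
    simp only [pvPT]
    by_cases hj2 : j = 2^t - 1
    · subst hj2
      rw [List.getElem_set_self]
      have hex : ∃ k, k < t + 1 ∧ 2^t - 1 = 2^k - 1 := ⟨t, by omega, rfl⟩
      rw [if_pos hex]
      have : ((2:Int)^t - 1) = (((2^t - 1 : ℕ)) : Int) := pv_pow_cast t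
      rw [this]
    · rw [List.getElem_set_ne (by omega)]
      rw [ih (by omega)]
      have hiff : (∃ k, k < t ∧ j = 2^k - 1) ↔ (∃ k, k < t + 1 ∧ j = 2^k - 1) := by
        constructor
        · rintro ⟨k, hk, he⟩; exact ⟨k, by omega, he⟩
        · rintro ⟨k, hk, he⟩
          refine ⟨k, ?_, he⟩
          rcases Nat.lt_or_ge k t with h | h
          · exact h
          · exfalso; have : k = t := by omega
            exact hj2 (by rw [he, this])
      by_cases hE : ∃ k, k < t ∧ j = 2^k - 1
      · rw [if_pos hE, if_pos (hiff.mp hE)]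
      · rw [if_neg hE, if_neg (fun h => hE (hiff.mpr h))]

-- the second pass, as a structural recursion over the remaining suffix
def pvFill : List (Option String) → Int → List (Option String)
  | [], _ => []
  | (none :: t), di => some ("D" ++ PySem.Int.toStr di) :: pvFill t (di+1)
  | (some s :: t), di => some s :: pvFill t di

theorem pv_drop_set {α : Type} (t : List α) (i : ℕ) (v : α) :
    (t.set i v).drop (i+1) = t.drop (i+1) := by
  apply List.ext_getElem (by simp)
  intro n h1 h2
  simp only [List.getElem_drop]
  rw [List.getElem_set_ne (by omega)]

theorem pv_take_set_succ {α : Type} (t : List α) (i : ℕ) (v : α) (hi : i < t.length) :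
    (t.set i v).take (i+1) = t.take i ++ [v] := by
  apply List.ext_getElem (by simp; omega)
  intro n h1 h2
  simp only [List.getElem_take]
  rcases Nat.lt_or_ge n i with h | h
  · rw [List.getElem_set_ne (by omega)]
    rw [List.getElem_append_left (by simp; omega)]
    simp [List.getElem_take]
  · have hn : n = i := by simp at h1; omega
    subst hn
    rw [List.getElem_set_self]
    rw [List.getElem_append_right (by simp only [List.length_take]; omega)]
    simp

theorem pv_data_fill_eq : ∀ (fuel : ℕ) (t : List (Option String)) (di : Int) (i : ℕ), t.length - i = fuel →
    data_fill t di i = t.take i ++ pvFill (t.drop i) di := by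
  intro fuel
  induction fuel with
  | zero =>
    intro t di i h
    have hge : t.length ≤ i := by omega
    rw [data_fill]
    rw [dif_neg (by omega)]
    rw [List.drop_eq_nil_of_le hge, List.take_of_length_le hge]
    simp [pvFill]
  | succ k ih =>
    intro t di i h
    have hi : i < t.length := by omega
    rw [data_fill, dif_pos hi]
    have hdrop : t.drop i = t[i] :: t.drop (i+1) := List.drop_eq_getElem_cons hi
    split
    · rename_i hv
      rw [ih (t.set i (some ("D" ++ PySem.Int.toStr di))) (di+1) (i+1) (by simp; omega)]
      rw [pv_drop_set, pv_take_set_succ _ _ _ hi]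
      rw [hdrop, hv]
      simp [pvFill]
    · rename_i s hv
      rw [ih t di (i+1) (by omega)]
      rw [hdrop, hv]
      rw [List.take_add_one]
      have : t[i]? = some (some s) := by rw [List.getElem?_eq_getElem hi, hv]
      simp [this, pvFill]

-- main loop correspondence: filling the parity table from position i = B's loop from the matching state
theorem pv_main (m : ℕ) : ∀ (fuel i c di : ℕ),
    (m + pvR m) - i = fuel → i ≤ m + pvR m → di + c = i → i + 1 ≤ 2^c → 2^c ≤ 2*i + 1 →
    (pvFill ((pvPT m (pvR m)).drop i) (di:Int)).map (fun o => o.getD "")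
      = create_tags_loop (m:Int) [] (i:Int) (di:Int) ((2:Int)^c) := by
  intro fuel
  induction fuel with
  | zero =>
    intro i c di hf hin hdc h1 h2
    have hi : i = m + pvR m := by omega
    have hspec := pvR_spec m
    have hcR : c = pvR m := by
      rcases Nat.lt_trichotomy c (pvR m) with h | h | h
      · have hmin := pvR_min m h
        omega
      · exact h
      · have hpow : 2^(pvR m + 1) ≤ 2^c := Nat.pow_le_pow_right (by norm_num) (by omega)
        have hs : 2^(pvR m + 1) = 2 * 2^(pvR m) := by ring
        omega
    have hdim : di = m := by omega
    have hdrop : (pvPT m (pvR m)).drop i = [] := List.drop_eq_nil_of_le (by rw [pvPT_length]; omega)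
    rw [hdrop]
    rw [create_tags_loop]
    rw [if_neg (show ¬ ((di:Int) < (m:Int)) by omega)]
    simp [pvFill]
  | succ k ih =>
    intro i c di hf hin hdc h1 h2
    have hilt : i < m + pvR m := by omega
    have hspec := pvR_spec m
    have h2s : 2^(pvR m + 1) = 2 * 2^(pvR m) := by ring
    have hcR : c ≤ pvR m := by
      by_contra hc
      have hpow : 2^(pvR m + 1) ≤ 2^c := Nat.pow_le_pow_right (by norm_num) (by omega)
      omega
    have hdi : di < m := by
      rcases Nat.eq_or_lt_of_le hcR with he | hlt
      · omega
      · have hg := pv_pow_gap c (pvR m - 1) (by omega)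
        have hR1 := pvR_min m (show pvR m - 1 < pvR m by omega)
        omega
    have hptlen : i < (pvPT m (pvR m)).length := by rw [pvPT_length]; exact hilt
    have hdropc : (pvPT m (pvR m)).drop i
        = (pvPT m (pvR m))[i]'hptlen :: (pvPT m (pvR m)).drop (i+1) :=
      List.drop_eq_getElem_cons hptlen
    have hval : (pvPT m (pvR m))[i]'hptlen
        = if ∃ kk, kk < pvR m ∧ i = 2^kk - 1 then some ("P" ++ PySem.Int.toStr (i:Int)) else none :=
      pvPT_get m (pvR m) le_rfl i hilt
    rw [hdropc, hval]
    rw [create_tags_loop]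
    rw [if_pos (show (di:Int) < (m:Int) by omega)]
    by_cases hp : i + 1 = 2^c
    · have hcR2 : c < pvR m := by
        by_contra hc
        have hpow : 2^(pvR m) ≤ 2^c := Nat.pow_le_pow_right (by norm_num) (by omega)
        omega
      have hex : ∃ kk, kk < pvR m ∧ i = 2^kk - 1 := ⟨c, hcR2, by omega⟩
      rw [if_pos hex]
      rw [if_pos (show (i:Int) + 1 = (2:Int)^c by exact_mod_cast hp)]
      rw [pv_loop_acc (m:Int) _ _ _ _ _ le_rfl]
      have hpow2 : (2:Int)^c * 2 = (2:Int)^(c+1) := by ring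
      rw [hpow2]
      have hcs : 2^(c+1) = 2*2^c := by ring
      have hih := ih (i+1) (c+1) di (by omega) (by omega) (by omega) (by omega) (by omega)
      push_cast at hih
      simp only [pvFill, List.map_cons, Option.getD_some]
      rw [hih]
      simp
    · have hnex : ¬ ∃ kk, kk < pvR m ∧ i = 2^kk - 1 := by
        rintro ⟨kk, hkk, hik⟩
        have h4 : (1:ℕ) ≤ 2^kk := Nat.one_le_two_pow
        have hk1 : 2^kk = i + 1 := by omega
        have hkc : kk ≤ c := (Nat.pow_le_pow_iff_right (by norm_num : (1:ℕ) < 2)).mp (show (2:ℕ)^kk ≤ (2:ℕ)^c by omega)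
        have hsk : 2^(kk+1) = 2*2^kk := by ring
        have hck : c < kk + 1 := (Nat.pow_lt_pow_iff_right (by norm_num : (1:ℕ) < 2)).mp (show (2:ℕ)^c < (2:ℕ)^(kk+1) by omega)
        have hceq : c = kk := by omega
        subst hceq
        exact hp (by omega)
      rw [if_neg hnex]
      rw [if_neg (show ¬ ((i:Int) + 1 = (2:Int)^c) from fun hco => hp (by exact_mod_cast hco))]
      rw [pv_loop_acc (m:Int) _ _ _ _ _ le_rfl]
      have hih := ih (i+1) c (di+1) (by omega) (by omega) (by omega) (by omega) (by omega)
      push_cast at hih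
      simp only [pvFill, List.map_cons, Option.getD_some]
      rw [hih]
      simp

theorem pv_create_tags_pos (m : ℕ) (hm : 1 ≤ m) : create_tags (m:Int) = create_tags_alt (m:Int) := by
  simp only [create_tags, create_tags_alt]
  rw [pv_fpi m]
  have hlen : ((((List.range (pvR m)).map (fun k => (2:Int)^k - 1)).length : ℕ) : Int) = (pvR m : Int) := by
    simp
  rw [hlen]
  have h0 : ((m:Int) + (pvR m : Int)).toNat = m + pvR m := by omega
  rw [h0]
  rw [pv_insert_parity_eq m (pvR m) le_rfl]
  rw [pv_data_fill_eq ((pvPT m (pvR m)).length) _ 0 0 rfl]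
  simp only [List.take_zero, List.drop_zero, List.nil_append]
  have hmain := pv_main m (m + pvR m) 0 0 0 (by omega) (by omega) (by omega) (by norm_num) (by norm_num)
  push_cast at hmain
  simpa using hmain

theorem pv_create_tags_nonpos (d : Int) (hd : d ≤ 0) : create_tags d = create_tags_alt d := by
  have hfpi : find_parity_indices d = [] := by
    unfold find_parity_indices
    rw [find_parity_indices_loop]
    rw [if_neg (show ¬ ((2:Int)^(0:ℕ) < d + ((0:ℕ):Int) + 1) by norm_num; omega)]
  simp only [create_tags, create_tags_alt]
  rw [hfpi]
  have h0 : (d + ((([] : List Int).length : ℕ) : Int)).toNat = 0 := by simp; omega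
  rw [h0]
  have hdf : data_fill (insert_parity (List.replicate 0 none) []) 0 0 = [] := by
    rw [data_fill]
    simp [insert_parity]
  have hl : create_tags_loop d [] 0 0 1 = [] := by
    rw [create_tags_loop]
    rw [if_neg (by omega)]
  rw [hdf, hl]
  simp

-- ===== VERDICT (by name: the statement is the Claim_ definition above) =====
theorem create_tags_spec : Claim_equal_create_tags := by
  intro d _hdom
  unfold Spec_create_tags
  by_cases hd : d ≤ 0
  · exact pv_create_tags_nonpos d hd
  · have he : d = ((d.toNat : ℕ) : Int) := by omega
    rw [he]
    exact pv_create_tags_pos d.toNat (by omega)
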